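-- pv_equiv track=rewrite | github.com/IronFalcon0/MEI-Project | generator/change_lines.py | changeLines
-- ===== SOURCE A (Python) =====
-- def changeLines(content_to_add, current_content):
--     for content in content_to_add:
--         file_name = content.split(',', 2)[0]
--         for i in range(len(current_content)):
--             if file_name == current_content[i].split(',', 2)[0]:
--                 current_content[i] = content
--                 break
--
--     return current_content
-- ===== SOURCE B (Python) =====
-- def changeLines(content_to_add, current_content):
--     # Build last-wins replacement map once, then a single pass over current_content
--     # replacing only the first line per prefix (same in-place mutation as A).
--     repl = {}
--     for content in content_to_add:
--         repl[content.split(',', 2)[0]] = content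
--     done = set()
--     for i in range(len(current_content)):
--         prefix = current_content[i].split(',', 2)[0]
--         if prefix in repl and prefix not in done:
--             current_content[i] = repl[prefix]
--             done.add(prefix)
--     return current_content
-- ===== Notes on version B (the rewrite author's own statement) =====
-- stated objective: faster
-- what changed: Replaces A's nested scan (for each new line, rescan current_content for the first prefix match) with a last-wins replacement dict built once plus a single pass over current_content guarded by a 'done' set so only the first line per prefix is replaced.
import Mathlib
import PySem

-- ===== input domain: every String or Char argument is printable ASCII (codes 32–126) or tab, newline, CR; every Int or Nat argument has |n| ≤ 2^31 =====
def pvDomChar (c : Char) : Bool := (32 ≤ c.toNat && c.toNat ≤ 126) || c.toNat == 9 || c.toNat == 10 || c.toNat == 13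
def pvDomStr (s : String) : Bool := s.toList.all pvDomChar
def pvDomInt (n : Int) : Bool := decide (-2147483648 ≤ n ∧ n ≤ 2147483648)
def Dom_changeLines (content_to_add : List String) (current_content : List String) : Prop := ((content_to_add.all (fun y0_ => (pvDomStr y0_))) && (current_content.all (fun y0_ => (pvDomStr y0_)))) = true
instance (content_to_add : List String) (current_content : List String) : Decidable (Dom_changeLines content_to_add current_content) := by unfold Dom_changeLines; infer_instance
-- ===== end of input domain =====

-- B builds a last-wins replacement dict once and does a single pass over current_content
-- (A rescans current_content for every added line). A and B mutate current_content in place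
-- in Python; the equivalence proved here is about the returned list (their final contents agree).

-- content.split(',', 2)[0]  (split with a nonempty separator always yields a nonempty list,
-- so the [0] never raises: getD []/headD "" are never hit)
def pvPrefix (s : String) : String :=
  ((PySem.Str.splitMax? s "," 2).getD []).headD ""

-- ===== PORT A =====
-- inner loop of A: scan current_content left to right, replace the first line whose
-- prefix equals fileName, then break
def pvReplaceFirst (fileName content : String) : List String → List String
  | [] => []
  | l :: rest =>
    if fileName = pvPrefix l then content :: rest
    else l :: pvReplaceFirst fileName content rest

def changeLines (content_to_add : List String) (current_content : List String) : List String :=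
  content_to_add.foldl (fun cur content => pvReplaceFirst (pvPrefix content) content cur) current_content

-- ===== PORT B =====
-- repl = {}; for content in content_to_add: repl[content.split(',',2)[0]] = content
def pvRepl (content_to_add : List String) : PySem.Dict String String :=
  content_to_add.foldl (fun d content => d.insert (pvPrefix content) content) PySem.Dict.empty

-- the single pass: 'prefix in repl and prefix not in done' → replace and mark done
def pvRun (r : PySem.Dict String String) (done : PySem.Set String) : List String → List String
  | [] => []
  | l :: rest =>
    match r.get? (pvPrefix l) with
    | some c =>
      if pvPrefix l ∈ done then l :: pvRun r done rest
      else c :: pvRun r (PySem.Set.add done (pvPrefix l)) rest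
    | none => l :: pvRun r done rest

def changeLines_alt (content_to_add : List String) (current_content : List String) : List String :=
  pvRun (pvRepl content_to_add) PySem.Set.empty current_content

-- ===== PRECONDITION & SPEC =====
def Spec_changeLines (content_to_add : List String) (current_content : List String) (out : List String) : Prop := out = changeLines_alt content_to_add current_content
instance (content_to_add : List String) (current_content : List String) (out : List String) : Decidable (Spec_changeLines content_to_add current_content out) := by unfold Spec_changeLines; infer_instance

-- ===== CLAIM (what is proved, stated in full; the proofs are below) =====
def Claim_equal_changeLines : Prop := ∀ (content_to_add : List String) (current_content : List String), Dom_changeLines content_to_add current_content → Spec_changeLines content_to_add current_content (changeLines content_to_add current_content)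

-- ===== LEMMAS AND PROOFS =====

-- unfolding equations for the single pass
lemma pvRun_cons_some {r : PySem.Dict String String} {d : PySem.Set String} {l : String}
    {rest : List String} {c : String} (h : r.get? (pvPrefix l) = some c) :
    pvRun r d (l :: rest)
      = if pvPrefix l ∈ d then l :: pvRun r d rest
        else c :: pvRun r (PySem.Set.add d (pvPrefix l)) rest := by
  simp only [pvRun, h]

lemma pvRun_cons_none {r : PySem.Dict String String} {d : PySem.Set String} {l : String}
    {rest : List String} (h : r.get? (pvPrefix l) = none) :
    pvRun r d (l :: rest) = l :: pvRun r d rest := by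
  simp only [pvRun, h]

-- lookups in the dict built by a foldl-insert loop starting from d
lemma pvRepl_get_aux (a : List String) : ∀ (d : PySem.Dict String String) (p : String),
    (a.foldl (fun d content => d.insert (pvPrefix content) content) d).get? p
      = ((pvRepl a).get? p).or (d.get? p) := by
  induction a with
  | nil => intro d p; simp [pvRepl, PySem.Dict.get?_empty]
  | cons x a ih =>
    intro d p
    have h1 : pvRepl (x :: a)
        = a.foldl (fun d content => d.insert (pvPrefix content) content)
            (PySem.Dict.empty.insert (pvPrefix x) x) := rfl
    rw [List.foldl_cons, ih, h1, ih (PySem.Dict.empty.insert (pvPrefix x) x), Option.or_assoc]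
    congr 1
    rw [PySem.Dict.get?_insert, PySem.Dict.get?_insert, PySem.Dict.get?_empty]
    split_ifs <;> simp

-- lookup in pvRepl (x :: a): a's entry wins, else x
lemma pvRepl_cons (x : String) (a : List String) (p : String) :
    (pvRepl (x :: a)).get? p
      = if p = pvPrefix x then some (((pvRepl a).get? p).getD x) else (pvRepl a).get? p := by
  have h1 : pvRepl (x :: a)
      = a.foldl (fun d content => d.insert (pvPrefix content) content)
          (PySem.Dict.empty.insert (pvPrefix x) x) := rfl
  rw [h1, pvRepl_get_aux a, PySem.Dict.get?_insert, PySem.Dict.get?_empty]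
  split_ifs with h
  · cases (pvRepl a).get? p <;> simp
  · simp

-- once px is marked done on the r' side, the extra px-entry of r' is invisible
lemma pvRun_done (r r' : PySem.Dict String String) (px x : String)
    (hr : ∀ p, r'.get? p = if p = px then some (((r.get? p).getD x)) else r.get? p) :
    ∀ (c : List String) (d₁ d₂ : PySem.Set String),
      (∀ p, p ≠ px → (p ∈ d₁ ↔ p ∈ d₂)) → px ∈ d₁ → (px ∈ d₂ ∨ r.get? px = none) →
      pvRun r' d₁ c = pvRun r d₂ c := by
  intro c
  induction c with
  | nil => intro d₁ d₂ _ _ _; rfl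
  | cons l rest ih =>
    intro d₁ d₂ hmem h1 h2
    by_cases hp : pvPrefix l = px
    · have hr' : r'.get? px = some ((r.get? px).getD x) := by rw [hr px, if_pos rfl]
      rw [pvRun_cons_some (l := l) (by rw [hp]; exact hr'), if_pos (by rw [hp]; exact h1)]
      cases h0 : r.get? px with
      | none =>
        rw [pvRun_cons_none (l := l) (by rw [hp]; exact h0)]
        exact congrArg (l :: ·) (ih d₁ d₂ hmem h1 h2)
      | some c0 =>
        have h2' : px ∈ d₂ := by
          rcases h2 with h | h
          · exact h
          · rw [h0] at h; exact absurd h (by simp)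
        rw [pvRun_cons_some (l := l) (by rw [hp]; exact h0), if_pos (by rw [hp]; exact h2')]
        exact congrArg (l :: ·) (ih d₁ d₂ hmem h1 h2)
    · have hr' : r'.get? (pvPrefix l) = r.get? (pvPrefix l) := by rw [hr (pvPrefix l), if_neg hp]
      cases h0 : r.get? (pvPrefix l) with
      | none =>
        rw [pvRun_cons_none (by rw [hr']; exact h0), pvRun_cons_none h0]
        exact congrArg (l :: ·) (ih d₁ d₂ hmem h1 h2)
      | some c0 =>
        rw [pvRun_cons_some (by rw [hr']; exact h0), pvRun_cons_some h0]
        by_cases hin : pvPrefix l ∈ d₁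
        · rw [if_pos hin, if_pos ((hmem _ hp).mp hin)]
          exact congrArg (l :: ·) (ih d₁ d₂ hmem h1 h2)
        · rw [if_neg hin, if_neg (fun h => hin ((hmem _ hp).mpr h))]
          refine congrArg (c0 :: ·) (ih _ _ ?_ ?_ ?_)
          · intro q hq
            rw [PySem.Set.mem_add, PySem.Set.mem_add, hmem q hq]
          · rw [PySem.Set.mem_add]; exact Or.inl h1
          · refine h2.imp (fun h => ?_) id
            rw [PySem.Set.mem_add]; exact Or.inl h

-- adding the entry px ↦ x on top of r equals one pvReplaceFirst pass on the input
lemma pvRun_main (r r' : PySem.Dict String String) (px x : String)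
    (hr : ∀ p, r'.get? p = if p = px then some (((r.get? p).getD x)) else r.get? p)
    (hx : pvPrefix x = px) :
    ∀ (c : List String) (d : PySem.Set String), px ∉ d →
      pvRun r' d c = pvRun r d (pvReplaceFirst px x c) := by
  intro c
  induction c with
  | nil => intro d _; rfl
  | cons l rest ih =>
    intro d hd
    by_cases hp : px = pvPrefix l
    · simp only [pvReplaceFirst, if_pos hp]
      have hr' : r'.get? (pvPrefix l) = some ((r.get? (pvPrefix l)).getD x) := by
        rw [hr (pvPrefix l), if_pos hp.symm]
      rw [pvRun_cons_some hr', if_neg (fun h => hd (hp.symm ▸ h))]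
      cases h0 : r.get? (pvPrefix l) with
      | none =>
        rw [pvRun_cons_none (l := x) (by rw [hx, hp]; exact h0)]
        refine congrArg (x :: ·) (pvRun_done r r' px x hr rest (PySem.Set.add d (pvPrefix l)) d ?_ ?_ ?_)
        · intro q hq
          rw [PySem.Set.mem_add]
          constructor
          · rintro (h | h)
            · exact h
            · exact absurd (hp ▸ h) hq
          · exact Or.inl
        · rw [PySem.Set.mem_add]; exact Or.inr hp
        · exact Or.inr (hp.symm ▸ h0)
      | some v =>
        rw [pvRun_cons_some (l := x) (by rw [hx, hp]; exact h0),
          if_neg (fun h => hd (hx ▸ h))]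
        have hpx : pvPrefix x = pvPrefix l := hx.trans hp
        rw [hpx]
        refine congrArg (v :: ·) (pvRun_done r r' px x hr rest
          (PySem.Set.add d (pvPrefix l)) (PySem.Set.add d (pvPrefix l)) (fun q _ => Iff.rfl) ?_ ?_)
        · rw [PySem.Set.mem_add]; exact Or.inr hp
        · left; rw [PySem.Set.mem_add]; exact Or.inr hp
    · simp only [pvReplaceFirst, if_neg hp]
      have hr' : r'.get? (pvPrefix l) = r.get? (pvPrefix l) := by
        rw [hr (pvPrefix l), if_neg (Ne.symm hp)]
      cases h0 : r.get? (pvPrefix l) with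
      | none =>
        rw [pvRun_cons_none (by rw [hr']; exact h0), pvRun_cons_none h0]
        exact congrArg (l :: ·) (ih d hd)
      | some c0 =>
        rw [pvRun_cons_some (by rw [hr']; exact h0), pvRun_cons_some h0]
        by_cases hin : pvPrefix l ∈ d
        · rw [if_pos hin, if_pos hin]
          exact congrArg (l :: ·) (ih d hd)
        · rw [if_neg hin, if_neg hin]
          refine congrArg (c0 :: ·) (ih _ ?_)
          rw [PySem.Set.mem_add]
          rintro (h | h)
          · exact hd h
          · exact hp h

-- an empty replacement dict leaves every line untouched
lemma pvRun_empty : ∀ (c : List String) (d : PySem.Set String),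
    pvRun PySem.Dict.empty d c = c := by
  intro c
  induction c with
  | nil => intro d; rfl
  | cons l rest ih =>
    intro d
    rw [pvRun_cons_none (PySem.Dict.get?_empty _)]
    exact congrArg (l :: ·) (ih d)

lemma changeLines_alt_eq (content_to_add : List String) :
    ∀ current_content : List String,
      changeLines_alt content_to_add current_content = changeLines content_to_add current_content := by
  induction content_to_add with
  | nil =>
    intro c
    simp only [changeLines_alt, changeLines, List.foldl_nil]
    exact pvRun_empty c PySem.Set.empty
  | cons x a ih =>
    intro c
    simp only [changeLines_alt, changeLines, List.foldl_cons] at *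
    rw [pvRun_main (pvRepl a) (pvRepl (x :: a)) (pvPrefix x) x (pvRepl_cons x a) rfl c
      PySem.Set.empty List.not_mem_nil]
    exact ih (pvReplaceFirst (pvPrefix x) x c)

-- ===== VERDICT (by name: the statement is the Claim_ definition above) =====
theorem changeLines_spec : Claim_equal_changeLines := by
  intro content_to_add current_content _
  unfold Spec_changeLines
  exact (changeLines_alt_eq content_to_add current_content).symm
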